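-- pv_equiv track=rewrite | github.com/antelopdev/Antelope | scripts/weeknum.py | GetDayDelta
-- ===== SOURCE A (Python) =====
-- class ISO:
--     DAYS_A_YEAR                = 365
--     DAYS_A_LEAP_YEAR           = 366
--     DAYS_A_WEEK                = 7
--     MONTHS_A_YEAR              = 12
--     DAYS_IN_FEBRUARY           = 28
--     LEAP_YEAR_DAYS_IN_FEBRUARY = 29
--     FIRST_MONTH_IN_YEAR        = 1
--
-- def IsALeapYear(year):
--     return ((not (year % 4)) and (year % 100)) or (not (year % 400))
--
-- def GetDaysInYear(year):
--     return  ISO.DAYS_A_LEAP_YEAR if (IsALeapYear(year)) else ISO.DAYS_A_YEAR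
--
-- def GetDaysInMonth(year, month):
--     return {
--         2  : ISO.LEAP_YEAR_DAYS_IN_FEBRUARY if (IsALeapYear(year)) else ISO.DAYS_IN_FEBRUARY,
--         4  : 30,
--         6  : 30,
--         9  : 30,
--         11 : 30,
--         }.get(int(month), 31)
--
-- def GetDayOfTheYear(year, month, day):
--     month = int(month)
--     day   = int(day)
--     ordinal_day = 0
--     for i in range(1, month):
--         ordinal_day += GetDaysInMonth(year, i)
--     ordinal_day += day
--     return ordinal_day
--
-- def GetDayDelta(start_year, start_month, start_day, end_year, end_month, end_day):
--     start_DoY = GetDayOfTheYear(start_year, start_month, start_day)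
--     end_DoY   = GetDayOfTheYear(end_year, end_month, end_day)
--     start     = min(start_year, end_year)
--     end       = max(start_year, end_year)
--     delta_day = 0
--     for i in range(start, end):
--         delta_day += GetDaysInYear(i)
--     if start_year == start :
--         delta_day += end_DoY - start_DoY
--         return delta_day
--     else :
--         delta_day += start_DoY - end_DoY
--         return -delta_day
-- ===== SOURCE B (Python) =====
-- # Day delta via absolute day numbers: whole years counted in closed form (leap years by
-- # floor divisions), day-of-year by the standard month-length loop, then one subtraction.
--
-- def _is_leap(year):
--     return (year % 4 == 0 and year % 100 != 0) or year % 400 == 0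
--
-- def _days_in_month(year, month):
--     if month == 2:
--         return 29 if _is_leap(year) else 28
--     if month in (4, 6, 9, 11):
--         return 30
--     return 31
--
-- def _day_number(year, month, day):
--     y1 = year - 1
--     days = 365 * year + y1 // 4 - y1 // 100 + y1 // 400
--     for m in range(1, month):
--         days += _days_in_month(year, m)
--     return days + day
--
-- def GetDayDelta(start_year, start_month, start_day, end_year, end_month, end_day):
--     return _day_number(end_year, end_month, end_day) - _day_number(start_year, start_month, start_day)
-- ===== Notes on version B (the rewrite author's own statement) =====
-- stated objective: faster
-- what changed: Replaces A's loop over every year between the two dates with a closed-form absolute day number (leap years counted by floor divisions //4, //100, //400) and a single subtraction; day-of-year keeps the standard month-length loop.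
import Mathlib
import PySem

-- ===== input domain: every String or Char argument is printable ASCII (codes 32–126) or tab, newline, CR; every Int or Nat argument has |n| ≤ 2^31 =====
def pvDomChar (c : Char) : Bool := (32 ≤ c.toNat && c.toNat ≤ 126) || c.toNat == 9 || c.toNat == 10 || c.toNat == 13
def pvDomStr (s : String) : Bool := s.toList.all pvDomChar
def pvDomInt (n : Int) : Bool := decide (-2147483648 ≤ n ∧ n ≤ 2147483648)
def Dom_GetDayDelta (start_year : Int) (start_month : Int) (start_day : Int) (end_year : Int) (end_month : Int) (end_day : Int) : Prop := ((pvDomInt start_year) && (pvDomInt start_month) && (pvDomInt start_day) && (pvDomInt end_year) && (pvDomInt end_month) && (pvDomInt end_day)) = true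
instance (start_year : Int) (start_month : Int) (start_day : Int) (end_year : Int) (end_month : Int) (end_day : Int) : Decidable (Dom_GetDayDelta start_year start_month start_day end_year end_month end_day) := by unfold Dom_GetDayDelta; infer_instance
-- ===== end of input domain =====

-- B replaces A's loop over every year between the two dates with a closed-form absolute day
-- number (leap years counted by floor divisions) and one subtraction; both are total.

-- ===== PORT A =====
-- IsALeapYear: Python returns a truthy/falsy value; it is only ever used as a condition,
-- ported as the Bool with the same truth value.
def pvIsALeapYear (year : Int) : Bool :=
  (PySem.Int.mod year 4 == 0 && !(PySem.Int.mod year 100 == 0)) || PySem.Int.mod year 400 == 0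

def pvGetDaysInYear (year : Int) : Int :=
  if pvIsALeapYear year then 366 else 365

def pvGetDaysInMonth (year : Int) (month : Int) : Int :=
  if month == 2 then (if pvIsALeapYear year then 29 else 28)
  else if month == 4 then 30
  else if month == 6 then 30
  else if month == 9 then 30
  else if month == 11 then 30
  else 31

def pvGetDayOfTheYear (year : Int) (month : Int) (day : Int) : Int :=
  let ordinal_day : Int := 0
  let ordinal_day := (PySem.List.pyRange 1 month 1).foldl
       (fun acc i => acc + pvGetDaysInMonth year i) ordinal_day
  ordinal_day + day

def GetDayDelta (start_year : Int) (start_month : Int) (start_day : Int) (end_year : Int) (end_month : Int) (end_day : Int) : Int :=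
  let start_DoY := pvGetDayOfTheYear start_year start_month start_day
  let end_DoY   := pvGetDayOfTheYear end_year end_month end_day
  let start     := min start_year end_year
  let «end»     := max start_year end_year
  let delta_day : Int := 0
  let delta_day := (PySem.List.pyRange start «end» 1).foldl
       (fun acc i => acc + pvGetDaysInYear i) delta_day
  if start_year == start then delta_day + (end_DoY - start_DoY)
  else -(delta_day + (start_DoY - end_DoY))

-- ===== PORT B =====
def pvIsLeapB (year : Int) : Bool :=
  (PySem.Int.mod year 4 == 0 && !(PySem.Int.mod year 100 == 0)) || PySem.Int.mod year 400 == 0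

def pvDaysInMonthB (year : Int) (month : Int) : Int :=
  if month == 2 then (if pvIsLeapB year then 29 else 28)
  else if month == 4 || month == 6 || month == 9 || month == 11 then 30
  else 31

def pvDayNumber (year : Int) (month : Int) (day : Int) : Int :=
  let y1 := year - 1
  let days := 365 * year + PySem.Int.floordiv y1 4
      - PySem.Int.floordiv y1 100 + PySem.Int.floordiv y1 400
  let days := (PySem.List.pyRange 1 month 1).foldl
       (fun acc m => acc + pvDaysInMonthB year m) days
  days + day

def GetDayDelta_alt (start_year : Int) (start_month : Int) (start_day : Int) (end_year : Int) (end_month : Int) (end_day : Int) : Int :=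
  pvDayNumber end_year end_month end_day - pvDayNumber start_year start_month start_day

-- ===== PRECONDITION & SPEC =====
def Spec_GetDayDelta (start_year : Int) (start_month : Int) (start_day : Int) (end_year : Int) (end_month : Int) (end_day : Int) (out : Int) : Prop := out = GetDayDelta_alt start_year start_month start_day end_year end_month end_day
instance (start_year : Int) (start_month : Int) (start_day : Int) (end_year : Int) (end_month : Int) (end_day : Int) (out : Int) : Decidable (Spec_GetDayDelta start_year start_month start_day end_year end_month end_day out) := by unfold Spec_GetDayDelta; infer_instance

-- ===== CLAIM (what is proved, stated in full; the proofs are below) =====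
def Claim_equal_GetDayDelta : Prop := ∀ (start_year : Int) (start_month : Int) (start_day : Int) (end_year : Int) (end_month : Int) (end_day : Int), Dom_GetDayDelta start_year start_month start_day end_year end_month end_day → Spec_GetDayDelta start_year start_month start_day end_year end_month end_day (GetDayDelta start_year start_month start_day end_year end_month end_day)

-- ===== LEMMAS AND PROOFS =====

-- year-number part of pvDayNumber
def pvF (y : Int) : Int :=
  365 * y + PySem.Int.floordiv (y - 1) 4 - PySem.Int.floordiv (y - 1) 100 + PySem.Int.floordiv (y - 1) 400

-- B's month table agrees with A's pointwise
lemma pvDaysInMonth_eq (y m : Int) : pvDaysInMonthB y m = pvGetDaysInMonth y m := by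
  simp only [pvDaysInMonthB, pvGetDaysInMonth, pvIsLeapB, pvIsALeapYear]
  split_ifs with h1 h2 h3 <;> simp_all

lemma pvFoldShift (f : Int → Int) (xs : List Int) (a b : Int) :
    xs.foldl (fun acc i => acc + f i) (a + b) = a + xs.foldl (fun acc i => acc + f i) b := by
  induction xs generalizing b with
  | nil => rfl
  | cons x t ih => simp only [List.foldl_cons, add_assoc, ih]

lemma pvDayNumber_eq (y m d : Int) :
    pvDayNumber y m d = pvF y + pvGetDayOfTheYear y m d := by
  simp only [pvDayNumber, pvF, pvGetDayOfTheYear]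
  have hfun : (fun acc i => acc + pvDaysInMonthB y i) = (fun acc i => acc + pvGetDaysInMonth y i) := by
    funext acc i; rw [pvDaysInMonth_eq]
  rw [hfun]
  have := pvFoldShift (pvGetDaysInMonth y) (PySem.List.pyRange 1 m 1)
      (365 * y + PySem.Int.floordiv (y - 1) 4 - PySem.Int.floordiv (y - 1) 100
        + PySem.Int.floordiv (y - 1) 400) 0
  simp only [add_zero] at this
  rw [this]
  ring

-- one step of A's year sum: pvF (y+1) - pvF y = days in year y
lemma pvF_step (y : Int) : pvF (y + 1) = pvF y + pvGetDaysInYear y := by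
  simp only [pvF, pvGetDaysInYear, pvIsALeapYear]
  rw [PySem.Int.floordiv_eq_ediv_of_pos (a := y + 1 - 1) (b := 4) (by norm_num),
      PySem.Int.floordiv_eq_ediv_of_pos (a := y + 1 - 1) (b := 100) (by norm_num),
      PySem.Int.floordiv_eq_ediv_of_pos (a := y + 1 - 1) (b := 400) (by norm_num),
      PySem.Int.floordiv_eq_ediv_of_pos (a := y - 1) (b := 4) (by norm_num),
      PySem.Int.floordiv_eq_ediv_of_pos (a := y - 1) (b := 100) (by norm_num),
      PySem.Int.floordiv_eq_ediv_of_pos (a := y - 1) (b := 400) (by norm_num)]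
  split_ifs with h <;>
    simp only [Bool.or_eq_true, Bool.and_eq_true, beq_iff_eq, Bool.not_eq_true',
      beq_eq_false_iff_ne, ne_eq, not_or, not_and, PySem.Int.mod_eq_zero_iff_dvd] at h <;>
    omega

-- A's year loop in closed form
lemma pvYearSum (s e : Int) (h : s ≤ e) :
    (PySem.List.pyRange s e 1).foldl (fun acc i => acc + pvGetDaysInYear i) 0 = pvF e - pvF s := by
  obtain ⟨n, hn⟩ : ∃ n : Nat, e = s + n := ⟨(e - s).toNat, by omega⟩
  subst hn
  clear h
  induction n with
  | zero => simp [PySem.List.pyRange_one_eq_nil (le_refl s)]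
  | succ k ih =>
    have hk : s ≤ s + (k : Int) := by omega
    rw [show ((Nat.succ k : Nat) : Int) = (k : Int) + 1 by push_cast; ring, ← add_assoc,
        PySem.List.pyRange_one_succ_right hk, List.foldl_append]
    simp only [List.foldl_cons, List.foldl_nil, ih, pvF_step (s + (k : Int))]
    ring

-- ===== VERDICT (by name: the statement is the Claim_ definition above) =====
theorem GetDayDelta_spec : Claim_equal_GetDayDelta := by
  intro sy sm sd ey em ed _
  unfold Spec_GetDayDelta
  unfold GetDayDelta GetDayDelta_alt
  simp only [pvDayNumber_eq]
  by_cases h : sy ≤ ey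
  · rw [min_eq_left h, max_eq_right h, pvYearSum sy ey h]
    simp only [beq_self_eq_true, if_true]
    ring
  · have h' : ey ≤ sy := by omega
    rw [min_eq_right h', max_eq_left h', pvYearSum ey sy h']
    have : (sy == ey) = false := by simp; omega
    rw [this]
    simp only [Bool.false_eq_true, if_false]
    ring
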